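-- pv_equiv track=rewrite | github.com/CasualInterest/Trip_Analysis | analysis_engine.py | get_last_leg_is_dh
-- ===== SOURCE A (Python) =====
-- def get_last_leg_is_dh(trip_lines):
--     """
--     Return True if the last flight leg of the trip is a deadhead (DH).
--     Scans every line with an airport-time-airport-time pattern and checks
--     whether 'DH' appears among the tokens on that same line.
--     """
--     last_leg_dh = False
--     for line in trip_lines:
--         if len(line) < 10:
--             continue
--         parts = line.split()
--         if len(parts) < 4:
--             continue
--         for i in range(len(parts) - 3):
--             p1 = parts[i]
--             p2 = parts[i + 1].rstrip('*')
--             p3 = parts[i + 2]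
--             p4 = parts[i + 3].rstrip('*')
--             if (len(p1) == 3 and p1.isalpha() and p1.isupper() and
--                     len(p2) == 4 and p2.isdigit() and
--                     len(p3) == 3 and p3.isalpha() and p3.isupper() and
--                     len(p4) == 4 and p4.isdigit()):
--                 last_leg_dh = 'DH' in parts
--                 break
--     return last_leg_dh
-- ===== SOURCE B (Python) =====
-- def _is_leg_window(parts, i):
--     p1 = parts[i]
--     p2 = parts[i + 1].rstrip('*')
--     p3 = parts[i + 2]
--     p4 = parts[i + 3].rstrip('*')
--     return (len(p1) == 3 and p1.isalpha() and p1.isupper() and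
--             len(p2) == 4 and p2.isdigit() and
--             len(p3) == 3 and p3.isalpha() and p3.isupper() and
--             len(p4) == 4 and p4.isdigit())
--
--
-- def get_last_leg_is_dh(trip_lines):
--     """Reverse scan: return the answer for the FIRST matching line from the end."""
--     for line in reversed(list(trip_lines)):
--         if len(line) < 10:
--             continue
--         parts = line.split()
--         if len(parts) < 4:
--             continue
--         if any(_is_leg_window(parts, i) for i in range(len(parts) - 3)):
--             return 'DH' in parts
--     return False
-- ===== Notes on version B (the rewrite author's own statement) =====
-- stated objective: alternative
-- what changed: Forward scan over all lines with a last-match accumulator and an inner break replaced by a reverse scan that tests each line's token windows with any() and returns immediately at the first (i.e. last) matching line.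
import Mathlib
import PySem

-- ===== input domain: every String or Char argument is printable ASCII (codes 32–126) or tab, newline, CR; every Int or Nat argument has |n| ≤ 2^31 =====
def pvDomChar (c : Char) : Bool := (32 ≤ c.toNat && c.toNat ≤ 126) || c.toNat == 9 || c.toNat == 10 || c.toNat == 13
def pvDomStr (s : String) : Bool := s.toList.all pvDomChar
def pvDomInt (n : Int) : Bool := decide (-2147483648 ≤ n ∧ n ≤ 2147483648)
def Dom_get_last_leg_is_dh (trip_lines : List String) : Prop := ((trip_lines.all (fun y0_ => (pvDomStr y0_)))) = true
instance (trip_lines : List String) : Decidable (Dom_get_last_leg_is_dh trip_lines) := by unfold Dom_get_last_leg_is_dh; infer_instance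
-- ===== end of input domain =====

-- B replaces A's forward scan with a last-match accumulator by a reverse scan
-- returning at the first matching line (same answer); objective: alternative decomposition.


-- shared primitive ports (stand-ins for Python built-ins both versions call):
-- s.rstrip('*') — exact: drops trailing '*' characters only (PySem has no chars-argument rstrip)
def pvRstripStar (s : String) : String :=
  String.ofList ((s.toList.reverse.dropWhile (fun c => c == '*')).reverse)

-- s.isupper() — exact on the ASCII domain: some cased character, and no lowercase character
def pvIsupper (s : String) : Bool :=
  s.toList.any (fun c => PySem.Chars.isupper c) && s.toList.all (fun c => !PySem.Chars.islower c)

-- the 4-token window test shared verbatim by A's inner loop body and B's _is_leg_window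
def pvWinTest (parts : List String) (i : Int) : Bool :=
  let p1 := PySem.List.pyGetD parts i ""
  let p2 := pvRstripStar (PySem.List.pyGetD parts (i + 1) "")
  let p3 := PySem.List.pyGetD parts (i + 2) ""
  let p4 := pvRstripStar (PySem.List.pyGetD parts (i + 3) "")
  PySem.Str.len p1 == 3 && PySem.Str.strIsalpha p1 && pvIsupper p1 &&
  PySem.Str.len p2 == 4 && PySem.Str.strIsdigit p2 &&
  PySem.Str.len p3 == 3 && PySem.Str.strIsalpha p3 && pvIsupper p3 &&
  PySem.Str.len p4 == 4 && PySem.Str.strIsdigit p4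

-- ===== PORT A =====
-- A's inner for-loop body, with the break carried as (done, acc) state
def pvStep (parts : List String) (st : Bool × Bool) (i : Int) : Bool × Bool :=
  if st.1 then st
  else if pvWinTest parts i then (true, parts.contains "DH")
  else st

-- forward fold over the lines, last match overwriting the accumulator
def get_last_leg_is_dh (trip_lines : List String) : Bool :=
  trip_lines.foldl
    (fun last_leg_dh line =>
      if PySem.Str.len line < 10 then last_leg_dh
      else
        let parts := PySem.Str.split₀ line
        if PySem.List.len parts < 4 then last_leg_dh
        else
          ((PySem.List.pyRange 0 (PySem.List.len parts - 3) 1).foldl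
            (pvStep parts) (false, last_leg_dh)).2)
    false

-- ===== PORT B =====
def pvRevScan : List String → Bool
  | [] => false
  | line :: rest =>
    if PySem.Str.len line < 10 then pvRevScan rest
    else
      let parts := PySem.Str.split₀ line
      if PySem.List.len parts < 4 then pvRevScan rest
      else if (PySem.List.pyRange 0 (PySem.List.len parts - 3) 1).any (fun i => pvWinTest parts i)
        then parts.contains "DH"
        else pvRevScan rest

def get_last_leg_is_dh_alt (trip_lines : List String) : Bool :=
  pvRevScan trip_lines.reverse

-- ===== PRECONDITION & SPEC =====
def Spec_get_last_leg_is_dh (trip_lines : List String) (out : Bool) : Prop := out = get_last_leg_is_dh_alt trip_lines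
instance (trip_lines : List String) (out : Bool) : Decidable (Spec_get_last_leg_is_dh trip_lines out) := by unfold Spec_get_last_leg_is_dh; infer_instance

-- ===== CLAIM (what is proved, stated in full; the proofs are below) =====
def Claim_equal_get_last_leg_is_dh : Prop := ∀ (trip_lines : List String), Dom_get_last_leg_is_dh trip_lines → Spec_get_last_leg_is_dh trip_lines (get_last_leg_is_dh trip_lines)

-- ===== LEMMAS AND PROOFS =====

-- what one line contributes: none = no leg window on the line, some v = the line's answer
def pvLineVal (line : String) : Option Bool :=
  if PySem.Str.len line < 10 then none
  else
    let parts := PySem.Str.split₀ line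
    if PySem.List.len parts < 4 then none
    else if (PySem.List.pyRange 0 (PySem.List.len parts - 3) 1).any (fun i => pvWinTest parts i)
      then some (parts.contains "DH")
      else none

-- A's inner break-loop computes: acc unless some window matches, then the line answer
theorem pvInnerFold (parts : List String) (l : List Int) (st : Bool × Bool) :
    (l.foldl (pvStep parts) st).2
      = if st.1 then st.2
        else if l.any (fun i => pvWinTest parts i) then parts.contains "DH" else st.2 := by
  induction l generalizing st with
  | nil => simp
  | cons x xs ih =>
    rw [List.foldl_cons, ih]
    by_cases h1 : st.1
    · simp [pvStep, h1]
    · by_cases h2 : pvWinTest parts x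
      · simp [pvStep, h1, h2]
      · simp [pvStep, h1, h2]

-- A's per-line step is (pvLineVal line).getD acc
theorem pvStepEq (a : Bool) (line : String) :
    (if PySem.Str.len line < 10 then a
      else
        let parts := PySem.Str.split₀ line
        if PySem.List.len parts < 4 then a
        else
          ((PySem.List.pyRange 0 (PySem.List.len parts - 3) 1).foldl
            (pvStep parts) (false, a)).2)
      = (pvLineVal line).getD a := by
  unfold pvLineVal
  by_cases h1 : PySem.Str.len line < 10
  · simp only [if_pos h1, Option.getD_none]
  · simp only [if_neg h1]
    by_cases h2 : PySem.List.len (PySem.Str.split₀ line) < 4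
    · simp only [if_pos h2, Option.getD_none]
    · simp only [if_neg h2]
      rw [pvInnerFold]
      by_cases h3 : (PySem.List.pyRange 0 (PySem.List.len (PySem.Str.split₀ line) - 3) 1).any
          (fun i => pvWinTest (PySem.Str.split₀ line) i)
      · simp only [if_pos h3, Bool.false_eq_true, if_false, Option.getD_some]
      · simp only [if_neg h3, Bool.false_eq_true, if_false, Option.getD_none]

-- B's recursion computes the first line value of its list, defaulting to false
theorem pvRevScanEq (l : List String) : pvRevScan l = (l.findSome? pvLineVal).getD false := by
  induction l with
  | nil => simp [pvRevScan]
  | cons x xs ih =>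
    rw [pvRevScan, List.findSome?_cons]
    unfold pvLineVal
    by_cases h1 : PySem.Str.len x < 10
    · simp only [if_pos h1]; exact ih
    · simp only [if_neg h1]
      by_cases h2 : PySem.List.len (PySem.Str.split₀ x) < 4
      · simp only [if_pos h2]; exact ih
      · simp only [if_neg h2]
        by_cases h3 : (PySem.List.pyRange 0 (PySem.List.len (PySem.Str.split₀ x) - 3) 1).any
            (fun i => pvWinTest (PySem.Str.split₀ x) i)
        · simp only [if_pos h3, Option.getD_some]
        · simp only [if_neg h3]; exact ih

-- the last-some-wins fold equals the first some of the reversed list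
theorem pvFoldGetD (l : List String) (a : Bool) :
    l.foldl (fun acc line => (pvLineVal line).getD acc) a
      = (l.reverse.findSome? pvLineVal).getD a := by
  induction l using List.reverseRecOn generalizing a with
  | nil => simp
  | append_singleton xs x ih =>
    rw [List.foldl_append, List.reverse_append]
    simp only [List.foldl_cons, List.foldl_nil, List.reverse_singleton, List.singleton_append,
      List.findSome?_cons]
    cases h : pvLineVal x with
    | none => simp only [Option.getD_none]; exact ih a
    | some v =>
      simp only [Option.getD_some]

-- ===== VERDICT (by name: the statement is the Claim_ definition above) =====
theorem get_last_leg_is_dh_spec : Claim_equal_get_last_leg_is_dh := by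
  intro trip_lines _
  unfold Spec_get_last_leg_is_dh get_last_leg_is_dh get_last_leg_is_dh_alt
  rw [pvRevScanEq]
  rw [show (fun (last_leg_dh : Bool) (line : String) =>
      if PySem.Str.len line < 10 then last_leg_dh
      else
        let parts := PySem.Str.split₀ line
        if PySem.List.len parts < 4 then last_leg_dh
        else
          ((PySem.List.pyRange 0 (PySem.List.len parts - 3) 1).foldl
            (pvStep parts) (false, last_leg_dh)).2)
    = fun acc line => (pvLineVal line).getD acc from funext fun a => funext fun line => pvStepEq a line]
  exact pvFoldGetD trip_lines false
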